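-- pv_equiv track=rewrite | github.com/MehtaManan07/whisp | app/utils/timezone_detection.py | detect_timezone_from_phone
-- ===== SOURCE A (Python) =====
-- PHONE_PREFIX_TIMEZONE_MAP = {
--     "+91": "Asia/Kolkata",      # India
--     "+81": "Asia/Tokyo",         # Japan
--     "+44": "Europe/London",      # United Kingdom
--     "+1": "America/New_York",    # USA/Canada (default to Eastern Time)
--     "+61": "Australia/Sydney",   # Australia
--     "+65": "Asia/Singapore",     # Singapore
--     "+971": "Asia/Dubai",        # UAE
--     "+49": "Europe/Berlin",      # Germany
--     "+33": "Europe/Paris",       # France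
--     "+86": "Asia/Shanghai",      # China
-- }
--
-- def detect_timezone_from_phone(phone_number: str) -> str:
--     """
--     Detect timezone from phone number using country calling code prefix.
--
--     Args:
--         phone_number: International phone number (e.g., "+919876543210")
--
--     Returns:
--         IANA timezone string (e.g., "Asia/Kolkata"), defaults to "UTC" if detection fails
--
--     Examples:
--         >>> detect_timezone_from_phone("+919876543210")
--         'Asia/Kolkata'
--         >>> detect_timezone_from_phone("+447700900000")
--         'Europe/London'
--         >>> detect_timezone_from_phone("+819012345678")
--         'Asia/Tokyo'
--     """
--     if not phone_number:
--         return "UTC"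
--
--     # Normalize phone number (strip spaces and handle edge cases)
--     phone_number = phone_number.strip().replace(" ", "").replace("-", "")
--
--     # Ensure it starts with +
--     if not phone_number.startswith("+"):
--         return "UTC"
--
--     # Check each prefix (longest first to handle overlapping prefixes)
--     # Sort by length descending to match longer prefixes first (e.g., +971 before +1)
--     sorted_prefixes = sorted(PHONE_PREFIX_TIMEZONE_MAP.keys(), key=len, reverse=True)
--
--     for prefix in sorted_prefixes:
--         if phone_number.startswith(prefix):
--             return PHONE_PREFIX_TIMEZONE_MAP[prefix]
--
--     # No match found
--     return "UTC"
-- ===== SOURCE B (Python) =====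
-- PHONE_PREFIX_TIMEZONE_MAP = {
--     "+91": "Asia/Kolkata",      # India
--     "+81": "Asia/Tokyo",         # Japan
--     "+44": "Europe/London",      # United Kingdom
--     "+1": "America/New_York",    # USA/Canada (default to Eastern Time)
--     "+61": "Australia/Sydney",   # Australia
--     "+65": "Asia/Singapore",     # Singapore
--     "+971": "Asia/Dubai",        # UAE
--     "+49": "Europe/Berlin",      # Germany
--     "+33": "Europe/Paris",       # France
--     "+86": "Asia/Shanghai",      # China
-- }
--
--
-- def detect_timezone_from_phone(phone_number: str) -> str:
--     if not phone_number:
--         return "UTC"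
--
--     phone_number = phone_number.strip().replace(" ", "").replace("-", "")
--
--     if not phone_number.startswith("+"):
--         return "UTC"
--
--     # Single pass over the map in insertion order, keeping the longest matching
--     # prefix seen so far: no per-call sorting of the keys.
--     best_prefix, best_tz = "", "UTC"
--     for prefix, tz in PHONE_PREFIX_TIMEZONE_MAP.items():
--         if phone_number.startswith(prefix) and len(prefix) > len(best_prefix):
--             best_prefix, best_tz = prefix, tz
--
--     return best_tz
-- ===== Notes on version B (the rewrite author's own statement) =====
-- stated objective: alternative
-- what changed: Instead of sorting the keys by length and scanning them with an early return, B makes a single pass over the dict items in insertion order with a longest-matching-prefix accumulator and returns the accumulated timezone.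
import Mathlib
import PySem

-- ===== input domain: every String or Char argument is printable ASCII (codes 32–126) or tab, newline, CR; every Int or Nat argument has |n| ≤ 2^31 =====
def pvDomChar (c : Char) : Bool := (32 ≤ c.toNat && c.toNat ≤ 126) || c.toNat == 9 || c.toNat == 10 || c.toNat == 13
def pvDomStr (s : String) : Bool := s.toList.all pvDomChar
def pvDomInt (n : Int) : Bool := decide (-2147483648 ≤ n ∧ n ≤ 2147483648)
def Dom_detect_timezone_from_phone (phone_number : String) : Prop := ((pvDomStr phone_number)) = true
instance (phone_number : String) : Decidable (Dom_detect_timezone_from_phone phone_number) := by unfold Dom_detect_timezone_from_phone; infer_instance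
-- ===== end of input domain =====

-- B replaces A's sort-the-keys-then-scan-with-early-return by a single pass over the
-- dict items in insertion order that accumulates the longest matching prefix (alternative).

def pvTzMap : PySem.Dict String String := PySem.Dict.ofList
  [("+91", "Asia/Kolkata"), ("+81", "Asia/Tokyo"), ("+44", "Europe/London"),
   ("+1", "America/New_York"), ("+61", "Australia/Sydney"), ("+65", "Asia/Singapore"),
   ("+971", "Asia/Dubai"), ("+49", "Europe/Berlin"), ("+33", "Europe/Paris"),
   ("+86", "Asia/Shanghai")]

-- ===== PORT A =====
-- 'for prefix in sorted_prefixes: if phone.startswith(prefix): return MAP[prefix]'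
-- (prefix always comes from MAP's keys, so MAP[prefix] never raises; .getD "UTC" only totalises)
def pvLoopA (ps : List String) (p : String) : String :=
  match ps with
  | [] => "UTC"
  | k :: rest =>
      if PySem.Str.startswith p k then (pvTzMap.get? k).getD "UTC"
      else pvLoopA rest p

def detect_timezone_from_phone (phone_number : String) : String :=
  if phone_number = "" then "UTC"
  else
    let p := PySem.Str.replace (PySem.Str.replace (PySem.Str.strip phone_number) " " "") "-" ""
    if ¬ (PySem.Str.startswith p "+" = true) then "UTC"
    else
      let sorted_prefixes := PySem.List.sorted pvTzMap.keys (fun k => PySem.Str.len k) true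
      pvLoopA sorted_prefixes p

-- ===== PORT B =====
-- loop body: 'if phone.startswith(prefix) and len(prefix) > len(best_prefix): best_prefix, best_tz = prefix, tz'
def pvStep (p : String) (acc : String × String) (kv : String × String) : String × String :=
  if PySem.Str.startswith p kv.1 && decide (PySem.Str.len kv.1 > PySem.Str.len acc.1) then kv
  else acc

def detect_timezone_from_phone_alt (phone_number : String) : String :=
  if phone_number = "" then "UTC"
  else
    let p := PySem.Str.replace (PySem.Str.replace (PySem.Str.strip phone_number) " " "") "-" ""
    if ¬ (PySem.Str.startswith p "+" = true) then "UTC"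
    else
      (pvTzMap.items.foldl (pvStep p) ("", "UTC")).2

-- ===== PRECONDITION & SPEC =====
def Spec_detect_timezone_from_phone (phone_number : String) (out : String) : Prop := out = detect_timezone_from_phone_alt phone_number
instance (phone_number : String) (out : String) : Decidable (Spec_detect_timezone_from_phone phone_number out) := by unfold Spec_detect_timezone_from_phone; infer_instance

-- ===== CLAIM (what is proved, stated in full; the proofs are below) =====
def Claim_equal_detect_timezone_from_phone : Prop := ∀ (phone_number : String), Dom_detect_timezone_from_phone phone_number → Spec_detect_timezone_from_phone phone_number (detect_timezone_from_phone phone_number)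

-- ===== LEMMAS AND PROOFS =====

-- the common longest-prefix-match result, as a function of the character list
def pvSpecFun (l : List Char) : String :=
  if l.take 4 = ['+','9','7','1'] then "Asia/Dubai"
  else if l.take 3 = ['+','9','1'] then "Asia/Kolkata"
  else if l.take 3 = ['+','8','1'] then "Asia/Tokyo"
  else if l.take 3 = ['+','4','4'] then "Europe/London"
  else if l.take 3 = ['+','6','1'] then "Australia/Sydney"
  else if l.take 3 = ['+','6','5'] then "Asia/Singapore"
  else if l.take 3 = ['+','4','9'] then "Europe/Berlin"
  else if l.take 3 = ['+','3','3'] then "Europe/Paris"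
  else if l.take 3 = ['+','8','6'] then "Asia/Shanghai"
  else if l.take 2 = ['+','1'] then "America/New_York"
  else "UTC"

theorem pvStartswith_take (p k : String) : PySem.Str.startswith p k
    = decide (p.toList.take k.toList.length = k.toList) := by
  have hiff : (p.toList.take k.toList.length = k.toList) ↔ k.toList <+: p.toList := by
    rw [List.prefix_iff_eq_take, eq_comm]
  have h2 : decide (p.toList.take k.toList.length = k.toList)
      = decide (k.toList <+: p.toList) := decide_eq_decide.2 hiff
  rw [h2]
  by_cases h : k.toList <+: p.toList <;>
    simp [h, PySem.Chars.startswith_iff, PySem.Str.startswith_eq, Bool.eq_false_iff]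

theorem pvLoopA_spec (p : String) :
    pvLoopA ["+971", "+91", "+81", "+44", "+61", "+65", "+49", "+33", "+86", "+1"] p
      = pvSpecFun p.toList := by
  have e1 : "+91".toList = ['+','9','1'] := by decide
  have e2 : "+81".toList = ['+','8','1'] := by decide
  have e3 : "+44".toList = ['+','4','4'] := by decide
  have e4 : "+1".toList = ['+','1'] := by decide
  have e5 : "+61".toList = ['+','6','1'] := by decide
  have e6 : "+65".toList = ['+','6','5'] := by decide
  have e7 : "+971".toList = ['+','9','7','1'] := by decide
  have e8 : "+49".toList = ['+','4','9'] := by decide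
  have e9 : "+33".toList = ['+','3','3'] := by decide
  have e10 : "+86".toList = ['+','8','6'] := by decide
  have g1 : (pvTzMap.get? "+91").getD "UTC" = "Asia/Kolkata" := by decide
  have g2 : (pvTzMap.get? "+81").getD "UTC" = "Asia/Tokyo" := by decide
  have g3 : (pvTzMap.get? "+44").getD "UTC" = "Europe/London" := by decide
  have g4 : (pvTzMap.get? "+1").getD "UTC" = "America/New_York" := by decide
  have g5 : (pvTzMap.get? "+61").getD "UTC" = "Australia/Sydney" := by decide
  have g6 : (pvTzMap.get? "+65").getD "UTC" = "Asia/Singapore" := by decide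
  have g7 : (pvTzMap.get? "+971").getD "UTC" = "Asia/Dubai" := by decide
  have g8 : (pvTzMap.get? "+49").getD "UTC" = "Europe/Berlin" := by decide
  have g9 : (pvTzMap.get? "+33").getD "UTC" = "Europe/Paris" := by decide
  have g10 : (pvTzMap.get? "+86").getD "UTC" = "Asia/Shanghai" := by decide
  simp only [pvLoopA, pvStartswith_take, e1, e2, e3, e4, e5, e6, e7, e8, e9, e10,
    g1, g2, g3, g4, g5, g6, g7, g8, g9, g10, pvSpecFun]
  norm_num

theorem pvItems : pvTzMap.items =
  [("+91", "Asia/Kolkata"), ("+81", "Asia/Tokyo"), ("+44", "Europe/London"),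
   ("+1", "America/New_York"), ("+61", "Australia/Sydney"), ("+65", "Asia/Singapore"),
   ("+971", "Asia/Dubai"), ("+49", "Europe/Berlin"), ("+33", "Europe/Paris"),
   ("+86", "Asia/Shanghai")] := by decide

theorem pvTakeDown (l : List Char) (m n : Nat) (hmn : m ≤ n) {B : List Char} (h : l.take n = B) :
    l.take m = B.take m := by
  rw [← h, List.take_take, Nat.min_eq_left hmn]

theorem pvFoldB_spec (p : String) :
    (pvTzMap.items.foldl (pvStep p) ("", "UTC")).2 = pvSpecFun p.toList := by
  rw [pvItems]
  by_cases h_p971 : p.toList.take 4 = ['+','9','7','1']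
  · -- +971 matches
    have t2 : p.toList.take 2 = ['+','9'] := by have := pvTakeDown p.toList 2 4 (by norm_num) h_p971; simpa using this
    have t3 : p.toList.take 3 = ['+','9','7'] := by have := pvTakeDown p.toList 3 4 (by norm_num) h_p971; simpa using this
    have b1 : PySem.Str.startswith p "+91" = false := by rw [pvStartswith_take]; simp [t3]
    have b2 : PySem.Str.startswith p "+81" = false := by rw [pvStartswith_take]; simp [t3]
    have b3 : PySem.Str.startswith p "+44" = false := by rw [pvStartswith_take]; simp [t3]
    have b4 : PySem.Str.startswith p "+1" = false := by rw [pvStartswith_take]; simp [t2]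
    have b5 : PySem.Str.startswith p "+61" = false := by rw [pvStartswith_take]; simp [t3]
    have b6 : PySem.Str.startswith p "+65" = false := by rw [pvStartswith_take]; simp [t3]
    have b7 : PySem.Str.startswith p "+971" = true := by rw [pvStartswith_take]; simp [h_p971]
    have b8 : PySem.Str.startswith p "+49" = false := by rw [pvStartswith_take]; simp [t3]
    have b9 : PySem.Str.startswith p "+33" = false := by rw [pvStartswith_take]; simp [t3]
    have b10 : PySem.Str.startswith p "+86" = false := by rw [pvStartswith_take]; simp [t3]
    simp only [List.foldl, pvStep, b1, b2, b3, b4, b5, b6, b7, b8, b9, b10, Bool.false_and, Bool.true_and]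
    simp [pvSpecFun, h_p971, PySem.Str.len]
  by_cases h_p91 : p.toList.take 3 = ['+','9','1']
  · -- +91 matches
    have t2 : p.toList.take 2 = ['+','9'] := by have := pvTakeDown p.toList 2 3 (by norm_num) h_p91; simpa using this
    have b1 : PySem.Str.startswith p "+91" = true := by rw [pvStartswith_take]; simp [h_p91]
    have b2 : PySem.Str.startswith p "+81" = false := by rw [pvStartswith_take]; simp [h_p91]
    have b3 : PySem.Str.startswith p "+44" = false := by rw [pvStartswith_take]; simp [h_p91]
    have b4 : PySem.Str.startswith p "+1" = false := by rw [pvStartswith_take]; simp [t2]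
    have b5 : PySem.Str.startswith p "+61" = false := by rw [pvStartswith_take]; simp [h_p91]
    have b6 : PySem.Str.startswith p "+65" = false := by rw [pvStartswith_take]; simp [h_p91]
    have b7 : PySem.Str.startswith p "+971" = false := by
      rw [pvStartswith_take]
      have : p.toList.take 4 ≠ ['+','9','7','1'] := by
        intro hh; have := pvTakeDown p.toList 3 4 (by norm_num) hh; simp [h_p91] at this
      simp [this]
    have b8 : PySem.Str.startswith p "+49" = false := by rw [pvStartswith_take]; simp [h_p91]
    have b9 : PySem.Str.startswith p "+33" = false := by rw [pvStartswith_take]; simp [h_p91]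
    have b10 : PySem.Str.startswith p "+86" = false := by rw [pvStartswith_take]; simp [h_p91]
    have s_p971 : ¬ (p.toList.take 4 = ['+','9','7','1']) := by
      intro hh; have := pvTakeDown p.toList 3 4 (by norm_num) hh; simp [h_p91] at this
    simp only [List.foldl, pvStep, b1, b2, b3, b4, b5, b6, b7, b8, b9, b10, Bool.false_and, Bool.true_and]
    simp [pvSpecFun, s_p971, h_p91, PySem.Str.len]
  by_cases h_p81 : p.toList.take 3 = ['+','8','1']
  · -- +81 matches
    have t2 : p.toList.take 2 = ['+','8'] := by have := pvTakeDown p.toList 2 3 (by norm_num) h_p81; simpa using this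
    have b1 : PySem.Str.startswith p "+91" = false := by rw [pvStartswith_take]; simp [h_p81]
    have b2 : PySem.Str.startswith p "+81" = true := by rw [pvStartswith_take]; simp [h_p81]
    have b3 : PySem.Str.startswith p "+44" = false := by rw [pvStartswith_take]; simp [h_p81]
    have b4 : PySem.Str.startswith p "+1" = false := by rw [pvStartswith_take]; simp [t2]
    have b5 : PySem.Str.startswith p "+61" = false := by rw [pvStartswith_take]; simp [h_p81]
    have b6 : PySem.Str.startswith p "+65" = false := by rw [pvStartswith_take]; simp [h_p81]
    have b7 : PySem.Str.startswith p "+971" = false := by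
      rw [pvStartswith_take]
      have : p.toList.take 4 ≠ ['+','9','7','1'] := by
        intro hh; have := pvTakeDown p.toList 3 4 (by norm_num) hh; simp [h_p81] at this
      simp [this]
    have b8 : PySem.Str.startswith p "+49" = false := by rw [pvStartswith_take]; simp [h_p81]
    have b9 : PySem.Str.startswith p "+33" = false := by rw [pvStartswith_take]; simp [h_p81]
    have b10 : PySem.Str.startswith p "+86" = false := by rw [pvStartswith_take]; simp [h_p81]
    have s_p971 : ¬ (p.toList.take 4 = ['+','9','7','1']) := by
      intro hh; have := pvTakeDown p.toList 3 4 (by norm_num) hh; simp [h_p81] at this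
    simp only [List.foldl, pvStep, b1, b2, b3, b4, b5, b6, b7, b8, b9, b10, Bool.false_and, Bool.true_and]
    simp [pvSpecFun, s_p971, h_p81, PySem.Str.len]
  by_cases h_p44 : p.toList.take 3 = ['+','4','4']
  · -- +44 matches
    have t2 : p.toList.take 2 = ['+','4'] := by have := pvTakeDown p.toList 2 3 (by norm_num) h_p44; simpa using this
    have b1 : PySem.Str.startswith p "+91" = false := by rw [pvStartswith_take]; simp [h_p44]
    have b2 : PySem.Str.startswith p "+81" = false := by rw [pvStartswith_take]; simp [h_p44]
    have b3 : PySem.Str.startswith p "+44" = true := by rw [pvStartswith_take]; simp [h_p44]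
    have b4 : PySem.Str.startswith p "+1" = false := by rw [pvStartswith_take]; simp [t2]
    have b5 : PySem.Str.startswith p "+61" = false := by rw [pvStartswith_take]; simp [h_p44]
    have b6 : PySem.Str.startswith p "+65" = false := by rw [pvStartswith_take]; simp [h_p44]
    have b7 : PySem.Str.startswith p "+971" = false := by
      rw [pvStartswith_take]
      have : p.toList.take 4 ≠ ['+','9','7','1'] := by
        intro hh; have := pvTakeDown p.toList 3 4 (by norm_num) hh; simp [h_p44] at this
      simp [this]
    have b8 : PySem.Str.startswith p "+49" = false := by rw [pvStartswith_take]; simp [h_p44]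
    have b9 : PySem.Str.startswith p "+33" = false := by rw [pvStartswith_take]; simp [h_p44]
    have b10 : PySem.Str.startswith p "+86" = false := by rw [pvStartswith_take]; simp [h_p44]
    have s_p971 : ¬ (p.toList.take 4 = ['+','9','7','1']) := by
      intro hh; have := pvTakeDown p.toList 3 4 (by norm_num) hh; simp [h_p44] at this
    simp only [List.foldl, pvStep, b1, b2, b3, b4, b5, b6, b7, b8, b9, b10, Bool.false_and, Bool.true_and]
    simp [pvSpecFun, s_p971, h_p44, PySem.Str.len]
  by_cases h_p61 : p.toList.take 3 = ['+','6','1']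
  · -- +61 matches
    have t2 : p.toList.take 2 = ['+','6'] := by have := pvTakeDown p.toList 2 3 (by norm_num) h_p61; simpa using this
    have b1 : PySem.Str.startswith p "+91" = false := by rw [pvStartswith_take]; simp [h_p61]
    have b2 : PySem.Str.startswith p "+81" = false := by rw [pvStartswith_take]; simp [h_p61]
    have b3 : PySem.Str.startswith p "+44" = false := by rw [pvStartswith_take]; simp [h_p61]
    have b4 : PySem.Str.startswith p "+1" = false := by rw [pvStartswith_take]; simp [t2]
    have b5 : PySem.Str.startswith p "+61" = true := by rw [pvStartswith_take]; simp [h_p61]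
    have b6 : PySem.Str.startswith p "+65" = false := by rw [pvStartswith_take]; simp [h_p61]
    have b7 : PySem.Str.startswith p "+971" = false := by
      rw [pvStartswith_take]
      have : p.toList.take 4 ≠ ['+','9','7','1'] := by
        intro hh; have := pvTakeDown p.toList 3 4 (by norm_num) hh; simp [h_p61] at this
      simp [this]
    have b8 : PySem.Str.startswith p "+49" = false := by rw [pvStartswith_take]; simp [h_p61]
    have b9 : PySem.Str.startswith p "+33" = false := by rw [pvStartswith_take]; simp [h_p61]
    have b10 : PySem.Str.startswith p "+86" = false := by rw [pvStartswith_take]; simp [h_p61]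
    have s_p971 : ¬ (p.toList.take 4 = ['+','9','7','1']) := by
      intro hh; have := pvTakeDown p.toList 3 4 (by norm_num) hh; simp [h_p61] at this
    simp only [List.foldl, pvStep, b1, b2, b3, b4, b5, b6, b7, b8, b9, b10, Bool.false_and, Bool.true_and]
    simp [pvSpecFun, s_p971, h_p61, PySem.Str.len]
  by_cases h_p65 : p.toList.take 3 = ['+','6','5']
  · -- +65 matches
    have t2 : p.toList.take 2 = ['+','6'] := by have := pvTakeDown p.toList 2 3 (by norm_num) h_p65; simpa using this
    have b1 : PySem.Str.startswith p "+91" = false := by rw [pvStartswith_take]; simp [h_p65]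
    have b2 : PySem.Str.startswith p "+81" = false := by rw [pvStartswith_take]; simp [h_p65]
    have b3 : PySem.Str.startswith p "+44" = false := by rw [pvStartswith_take]; simp [h_p65]
    have b4 : PySem.Str.startswith p "+1" = false := by rw [pvStartswith_take]; simp [t2]
    have b5 : PySem.Str.startswith p "+61" = false := by rw [pvStartswith_take]; simp [h_p65]
    have b6 : PySem.Str.startswith p "+65" = true := by rw [pvStartswith_take]; simp [h_p65]
    have b7 : PySem.Str.startswith p "+971" = false := by
      rw [pvStartswith_take]
      have : p.toList.take 4 ≠ ['+','9','7','1'] := by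
        intro hh; have := pvTakeDown p.toList 3 4 (by norm_num) hh; simp [h_p65] at this
      simp [this]
    have b8 : PySem.Str.startswith p "+49" = false := by rw [pvStartswith_take]; simp [h_p65]
    have b9 : PySem.Str.startswith p "+33" = false := by rw [pvStartswith_take]; simp [h_p65]
    have b10 : PySem.Str.startswith p "+86" = false := by rw [pvStartswith_take]; simp [h_p65]
    have s_p971 : ¬ (p.toList.take 4 = ['+','9','7','1']) := by
      intro hh; have := pvTakeDown p.toList 3 4 (by norm_num) hh; simp [h_p65] at this
    simp only [List.foldl, pvStep, b1, b2, b3, b4, b5, b6, b7, b8, b9, b10, Bool.false_and, Bool.true_and]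
    simp [pvSpecFun, s_p971, h_p65, PySem.Str.len]
  by_cases h_p49 : p.toList.take 3 = ['+','4','9']
  · -- +49 matches
    have t2 : p.toList.take 2 = ['+','4'] := by have := pvTakeDown p.toList 2 3 (by norm_num) h_p49; simpa using this
    have b1 : PySem.Str.startswith p "+91" = false := by rw [pvStartswith_take]; simp [h_p49]
    have b2 : PySem.Str.startswith p "+81" = false := by rw [pvStartswith_take]; simp [h_p49]
    have b3 : PySem.Str.startswith p "+44" = false := by rw [pvStartswith_take]; simp [h_p49]
    have b4 : PySem.Str.startswith p "+1" = false := by rw [pvStartswith_take]; simp [t2]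
    have b5 : PySem.Str.startswith p "+61" = false := by rw [pvStartswith_take]; simp [h_p49]
    have b6 : PySem.Str.startswith p "+65" = false := by rw [pvStartswith_take]; simp [h_p49]
    have b7 : PySem.Str.startswith p "+971" = false := by
      rw [pvStartswith_take]
      have : p.toList.take 4 ≠ ['+','9','7','1'] := by
        intro hh; have := pvTakeDown p.toList 3 4 (by norm_num) hh; simp [h_p49] at this
      simp [this]
    have b8 : PySem.Str.startswith p "+49" = true := by rw [pvStartswith_take]; simp [h_p49]
    have b9 : PySem.Str.startswith p "+33" = false := by rw [pvStartswith_take]; simp [h_p49]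
    have b10 : PySem.Str.startswith p "+86" = false := by rw [pvStartswith_take]; simp [h_p49]
    have s_p971 : ¬ (p.toList.take 4 = ['+','9','7','1']) := by
      intro hh; have := pvTakeDown p.toList 3 4 (by norm_num) hh; simp [h_p49] at this
    simp only [List.foldl, pvStep, b1, b2, b3, b4, b5, b6, b7, b8, b9, b10, Bool.false_and, Bool.true_and]
    simp [pvSpecFun, s_p971, h_p49, PySem.Str.len]
  by_cases h_p33 : p.toList.take 3 = ['+','3','3']
  · -- +33 matches
    have t2 : p.toList.take 2 = ['+','3'] := by have := pvTakeDown p.toList 2 3 (by norm_num) h_p33; simpa using this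
    have b1 : PySem.Str.startswith p "+91" = false := by rw [pvStartswith_take]; simp [h_p33]
    have b2 : PySem.Str.startswith p "+81" = false := by rw [pvStartswith_take]; simp [h_p33]
    have b3 : PySem.Str.startswith p "+44" = false := by rw [pvStartswith_take]; simp [h_p33]
    have b4 : PySem.Str.startswith p "+1" = false := by rw [pvStartswith_take]; simp [t2]
    have b5 : PySem.Str.startswith p "+61" = false := by rw [pvStartswith_take]; simp [h_p33]
    have b6 : PySem.Str.startswith p "+65" = false := by rw [pvStartswith_take]; simp [h_p33]
    have b7 : PySem.Str.startswith p "+971" = false := by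
      rw [pvStartswith_take]
      have : p.toList.take 4 ≠ ['+','9','7','1'] := by
        intro hh; have := pvTakeDown p.toList 3 4 (by norm_num) hh; simp [h_p33] at this
      simp [this]
    have b8 : PySem.Str.startswith p "+49" = false := by rw [pvStartswith_take]; simp [h_p33]
    have b9 : PySem.Str.startswith p "+33" = true := by rw [pvStartswith_take]; simp [h_p33]
    have b10 : PySem.Str.startswith p "+86" = false := by rw [pvStartswith_take]; simp [h_p33]
    have s_p971 : ¬ (p.toList.take 4 = ['+','9','7','1']) := by
      intro hh; have := pvTakeDown p.toList 3 4 (by norm_num) hh; simp [h_p33] at this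
    simp only [List.foldl, pvStep, b1, b2, b3, b4, b5, b6, b7, b8, b9, b10, Bool.false_and, Bool.true_and]
    simp [pvSpecFun, s_p971, h_p33, PySem.Str.len]
  by_cases h_p86 : p.toList.take 3 = ['+','8','6']
  · -- +86 matches
    have t2 : p.toList.take 2 = ['+','8'] := by have := pvTakeDown p.toList 2 3 (by norm_num) h_p86; simpa using this
    have b1 : PySem.Str.startswith p "+91" = false := by rw [pvStartswith_take]; simp [h_p86]
    have b2 : PySem.Str.startswith p "+81" = false := by rw [pvStartswith_take]; simp [h_p86]
    have b3 : PySem.Str.startswith p "+44" = false := by rw [pvStartswith_take]; simp [h_p86]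
    have b4 : PySem.Str.startswith p "+1" = false := by rw [pvStartswith_take]; simp [t2]
    have b5 : PySem.Str.startswith p "+61" = false := by rw [pvStartswith_take]; simp [h_p86]
    have b6 : PySem.Str.startswith p "+65" = false := by rw [pvStartswith_take]; simp [h_p86]
    have b7 : PySem.Str.startswith p "+971" = false := by
      rw [pvStartswith_take]
      have : p.toList.take 4 ≠ ['+','9','7','1'] := by
        intro hh; have := pvTakeDown p.toList 3 4 (by norm_num) hh; simp [h_p86] at this
      simp [this]
    have b8 : PySem.Str.startswith p "+49" = false := by rw [pvStartswith_take]; simp [h_p86]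
    have b9 : PySem.Str.startswith p "+33" = false := by rw [pvStartswith_take]; simp [h_p86]
    have b10 : PySem.Str.startswith p "+86" = true := by rw [pvStartswith_take]; simp [h_p86]
    have s_p971 : ¬ (p.toList.take 4 = ['+','9','7','1']) := by
      intro hh; have := pvTakeDown p.toList 3 4 (by norm_num) hh; simp [h_p86] at this
    simp only [List.foldl, pvStep, b1, b2, b3, b4, b5, b6, b7, b8, b9, b10, Bool.false_and, Bool.true_and]
    simp [pvSpecFun, s_p971, h_p86, PySem.Str.len]
  by_cases h_p1 : p.toList.take 2 = ['+','1']
  · -- +1 matches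
    have b1 : PySem.Str.startswith p "+91" = false := by
      rw [pvStartswith_take]
      have : p.toList.take 3 ≠ ['+','9','1'] := by
        intro hh; have := pvTakeDown p.toList 2 3 (by norm_num) hh; simp [h_p1] at this
      simp [this]
    have b2 : PySem.Str.startswith p "+81" = false := by
      rw [pvStartswith_take]
      have : p.toList.take 3 ≠ ['+','8','1'] := by
        intro hh; have := pvTakeDown p.toList 2 3 (by norm_num) hh; simp [h_p1] at this
      simp [this]
    have b3 : PySem.Str.startswith p "+44" = false := by
      rw [pvStartswith_take]
      have : p.toList.take 3 ≠ ['+','4','4'] := by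
        intro hh; have := pvTakeDown p.toList 2 3 (by norm_num) hh; simp [h_p1] at this
      simp [this]
    have b4 : PySem.Str.startswith p "+1" = true := by rw [pvStartswith_take]; simp [h_p1]
    have b5 : PySem.Str.startswith p "+61" = false := by
      rw [pvStartswith_take]
      have : p.toList.take 3 ≠ ['+','6','1'] := by
        intro hh; have := pvTakeDown p.toList 2 3 (by norm_num) hh; simp [h_p1] at this
      simp [this]
    have b6 : PySem.Str.startswith p "+65" = false := by
      rw [pvStartswith_take]
      have : p.toList.take 3 ≠ ['+','6','5'] := by
        intro hh; have := pvTakeDown p.toList 2 3 (by norm_num) hh; simp [h_p1] at this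
      simp [this]
    have b7 : PySem.Str.startswith p "+971" = false := by
      rw [pvStartswith_take]
      have : p.toList.take 4 ≠ ['+','9','7','1'] := by
        intro hh; have := pvTakeDown p.toList 2 4 (by norm_num) hh; simp [h_p1] at this
      simp [this]
    have b8 : PySem.Str.startswith p "+49" = false := by
      rw [pvStartswith_take]
      have : p.toList.take 3 ≠ ['+','4','9'] := by
        intro hh; have := pvTakeDown p.toList 2 3 (by norm_num) hh; simp [h_p1] at this
      simp [this]
    have b9 : PySem.Str.startswith p "+33" = false := by
      rw [pvStartswith_take]
      have : p.toList.take 3 ≠ ['+','3','3'] := by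
        intro hh; have := pvTakeDown p.toList 2 3 (by norm_num) hh; simp [h_p1] at this
      simp [this]
    have b10 : PySem.Str.startswith p "+86" = false := by
      rw [pvStartswith_take]
      have : p.toList.take 3 ≠ ['+','8','6'] := by
        intro hh; have := pvTakeDown p.toList 2 3 (by norm_num) hh; simp [h_p1] at this
      simp [this]
    have s_p971 : ¬ (p.toList.take 4 = ['+','9','7','1']) := by
      intro hh; have := pvTakeDown p.toList 2 4 (by norm_num) hh; simp [h_p1] at this
    have s_p91 : ¬ (p.toList.take 3 = ['+','9','1']) := by
      intro hh; have := pvTakeDown p.toList 2 3 (by norm_num) hh; simp [h_p1] at this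
    have s_p81 : ¬ (p.toList.take 3 = ['+','8','1']) := by
      intro hh; have := pvTakeDown p.toList 2 3 (by norm_num) hh; simp [h_p1] at this
    have s_p44 : ¬ (p.toList.take 3 = ['+','4','4']) := by
      intro hh; have := pvTakeDown p.toList 2 3 (by norm_num) hh; simp [h_p1] at this
    have s_p61 : ¬ (p.toList.take 3 = ['+','6','1']) := by
      intro hh; have := pvTakeDown p.toList 2 3 (by norm_num) hh; simp [h_p1] at this
    have s_p65 : ¬ (p.toList.take 3 = ['+','6','5']) := by
      intro hh; have := pvTakeDown p.toList 2 3 (by norm_num) hh; simp [h_p1] at this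
    have s_p49 : ¬ (p.toList.take 3 = ['+','4','9']) := by
      intro hh; have := pvTakeDown p.toList 2 3 (by norm_num) hh; simp [h_p1] at this
    have s_p33 : ¬ (p.toList.take 3 = ['+','3','3']) := by
      intro hh; have := pvTakeDown p.toList 2 3 (by norm_num) hh; simp [h_p1] at this
    have s_p86 : ¬ (p.toList.take 3 = ['+','8','6']) := by
      intro hh; have := pvTakeDown p.toList 2 3 (by norm_num) hh; simp [h_p1] at this
    simp only [List.foldl, pvStep, b1, b2, b3, b4, b5, b6, b7, b8, b9, b10, Bool.false_and, Bool.true_and]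
    simp [pvSpecFun, s_p971, s_p91, s_p81, s_p44, s_p61, s_p65, s_p49, s_p33, s_p86, h_p1, PySem.Str.len]
  have b1 : PySem.Str.startswith p "+91" = false := by rw [pvStartswith_take]; simp [h_p91]
  have b2 : PySem.Str.startswith p "+81" = false := by rw [pvStartswith_take]; simp [h_p81]
  have b3 : PySem.Str.startswith p "+44" = false := by rw [pvStartswith_take]; simp [h_p44]
  have b4 : PySem.Str.startswith p "+1" = false := by rw [pvStartswith_take]; simp [h_p1]
  have b5 : PySem.Str.startswith p "+61" = false := by rw [pvStartswith_take]; simp [h_p61]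
  have b6 : PySem.Str.startswith p "+65" = false := by rw [pvStartswith_take]; simp [h_p65]
  have b7 : PySem.Str.startswith p "+971" = false := by rw [pvStartswith_take]; simp [h_p971]
  have b8 : PySem.Str.startswith p "+49" = false := by rw [pvStartswith_take]; simp [h_p49]
  have b9 : PySem.Str.startswith p "+33" = false := by rw [pvStartswith_take]; simp [h_p33]
  have b10 : PySem.Str.startswith p "+86" = false := by rw [pvStartswith_take]; simp [h_p86]
  simp only [List.foldl, pvStep, b1, b2, b3, b4, b5, b6, b7, b8, b9, b10, Bool.false_and]
  simp [pvSpecFun, h_p971, h_p91, h_p81, h_p44, h_p61, h_p65, h_p49, h_p33, h_p86, h_p1]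


theorem pvSortedA : PySem.List.sorted pvTzMap.keys (fun k => PySem.Str.len k) true
    = ["+971", "+91", "+81", "+44", "+61", "+65", "+49", "+33", "+86", "+1"] := by decide

-- ===== VERDICT (by name: the statement is the Claim_ definition above) =====
theorem detect_timezone_from_phone_spec : Claim_equal_detect_timezone_from_phone := by
  intro s _
  show detect_timezone_from_phone s = detect_timezone_from_phone_alt s
  rw [detect_timezone_from_phone, detect_timezone_from_phone_alt]
  by_cases h1 : s = ""
  · rw [if_pos h1, if_pos h1]
  · rw [if_neg h1, if_neg h1]
    by_cases h2 : ¬ (PySem.Str.startswith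
        (PySem.Str.replace (PySem.Str.replace (PySem.Str.strip s) " " "") "-" "") "+" = true)
    · rw [if_pos h2, if_pos h2]
    · rw [if_neg h2, if_neg h2, pvSortedA, pvLoopA_spec, pvFoldB_spec]
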